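-- pv_equiv track=rewrite | github.com/sohv/mlboardkit | data_utils/deduplicate.py | length_based_dedup
-- ===== SOURCE A (Python) =====
-- from typing import List, Set, Dict, Any
--
-- def length_based_dedup(texts: List[str], max_length_diff: int = 10) -> List[str]:
--     """Remove texts with very similar lengths (potential duplicates)"""
--     length_groups: Dict[int, List[str]] = {}
--
--     # Group by length
--     for text in texts:
--         length = len(text)
--         if length not in length_groups:
--             length_groups[length] = []
--         length_groups[length].append(text)
--
--     result = []
--     for length, group_texts in length_groups.items():
--         if len(group_texts) == 1:
--             result.extend(group_texts)
--         else:
--             # Keep only first occurrence for same length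
--             result.append(group_texts[0])
--
--     return result
-- ===== SOURCE B (Python) =====
-- def length_based_dedup(texts, max_length_diff=10):
--     """Remove texts with very similar lengths (potential duplicates)"""
--     # One pass: keep the first text seen for each distinct length.
--     seen = set()
--     result = []
--     for text in texts:
--         n = len(text)
--         if n not in seen:
--             seen.add(n)
--             result.append(text)
--     return result
-- ===== Notes on version B (the rewrite author's own statement) =====
-- stated objective: simpler
-- what changed: Replaced the two-phase dict-of-lists grouping plus a second pass over the groups by a single pass that keeps a set of lengths already seen and appends the first text per distinct length directly.
import Mathlib
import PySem

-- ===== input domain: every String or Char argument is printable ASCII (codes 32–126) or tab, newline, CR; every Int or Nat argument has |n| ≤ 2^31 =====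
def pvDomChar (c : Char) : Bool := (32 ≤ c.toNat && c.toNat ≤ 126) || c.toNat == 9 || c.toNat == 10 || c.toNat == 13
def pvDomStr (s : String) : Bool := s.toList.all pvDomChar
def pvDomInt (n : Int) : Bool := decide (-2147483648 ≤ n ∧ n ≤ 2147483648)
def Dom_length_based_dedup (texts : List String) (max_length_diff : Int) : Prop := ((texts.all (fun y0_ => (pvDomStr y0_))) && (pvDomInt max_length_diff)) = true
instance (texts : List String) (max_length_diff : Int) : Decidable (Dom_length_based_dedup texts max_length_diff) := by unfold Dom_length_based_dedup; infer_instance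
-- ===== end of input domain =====

-- B replaces A's dict-of-lists grouping + second pass by a single pass with a seen-set of lengths (simpler).


-- ===== PORT A =====
def length_based_dedup (texts : List String) (_max_length_diff : Int) : List String :=
  -- for text in texts: group by length
  let length_groups : PySem.Dict Int (List String) :=
    texts.foldl (fun d text =>
      let length := PySem.Str.len text
      let d := if d.contains length then d else d.insert length []
      d.modify length [] (fun g => g ++ [text]))  -- length_groups[length].append(text)
      PySem.Dict.empty
  -- for length, group_texts in length_groups.items(): …  (groups are nonempty, so group_texts[0] is headI)
  length_groups.items.foldl (fun result p =>
    if p.2.length = 1 then result ++ p.2 else result ++ [p.2.headI]) []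

-- ===== PORT B =====
def length_based_dedup_alt (texts : List String) (_max_length_diff : Int) : List String :=
  (texts.foldl (fun (st : PySem.Set Int × List String) text =>
      let n := PySem.Str.len text
      if PySem.Set.contains st.1 n then st
      else (PySem.Set.add st.1 n, st.2 ++ [text]))
    (PySem.Set.empty, [])).2

-- ===== PRECONDITION & SPEC =====
def Spec_length_based_dedup (texts : List String) (max_length_diff : Int) (out : List String) : Prop := out = length_based_dedup_alt texts max_length_diff
instance (texts : List String) (max_length_diff : Int) (out : List String) : Decidable (Spec_length_based_dedup texts max_length_diff out) := by unfold Spec_length_based_dedup; infer_instance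

-- ===== CLAIM (what is proved, stated in full; the proofs are below) =====
def Claim_equal_length_based_dedup : Prop := ∀ (texts : List String) (max_length_diff : Int), Dom_length_based_dedup texts max_length_diff → Spec_length_based_dedup texts max_length_diff (length_based_dedup texts max_length_diff)

-- ===== LEMMAS AND PROOFS =====

-- Proof-only names for the two loop bodies (definitionally equal to the ports' lambdas).
def pvDStep (d : PySem.Dict Int (List String)) (text : String) : PySem.Dict Int (List String) :=
  let length := PySem.Str.len text
  let d := if d.contains length then d else d.insert length []
  d.modify length [] (fun g => g ++ [text])

def pvSStep (st : PySem.Set Int × List String) (text : String) : PySem.Set Int × List String :=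
  let n := PySem.Str.len text
  if PySem.Set.contains st.1 n then st
  else (PySem.Set.add st.1 n, st.2 ++ [text])

def pvHeads (d : PySem.Dict Int (List String)) : List String :=
  d.items.map (fun p => p.2.headI)

theorem headI_append_of_ne_nil {α : Type} [Inhabited α] (xs ys : List α) (h : xs ≠ []) :
    (xs ++ ys).headI = xs.headI := by
  cases xs with
  | nil => exact absurd rfl h
  | cons a t => rfl

theorem pvDStep_of_contains (d : PySem.Dict Int (List String)) (t : String)
    (hc : d.contains (PySem.Str.len t) = true) :
    pvDStep d t = d.insert (PySem.Str.len t) (d.getD (PySem.Str.len t) [] ++ [t]) := by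
  unfold pvDStep
  simp only [hc, if_true]
  rfl

theorem pvDStep_of_not_contains (d : PySem.Dict Int (List String)) (t : String)
    (hc : d.contains (PySem.Str.len t) = false) :
    pvDStep d t = d.insert (PySem.Str.len t) [t] := by
  unfold pvDStep
  simp only [hc, Bool.false_eq_true, if_false]
  have h1 : (d.insert (PySem.Str.len t) []).modify (PySem.Str.len t) [] (fun g => g ++ [t])
      = (d.insert (PySem.Str.len t) []).insert (PySem.Str.len t)
          ((d.insert (PySem.Str.len t) []).getD (PySem.Str.len t) [] ++ [t]) := rfl
  rw [h1, PySem.Dict.getD_insert_self]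
  exact PySem.Dict.insert_insert_self d _ [] [t]

-- A's second loop appends the head of every (nonempty) group.
theorem finish_eq_map (items : List (Int × List String)) (acc : List String)
    (h : ∀ p ∈ items, p.2 ≠ []) :
    items.foldl (fun result p =>
      if p.2.length = 1 then result ++ p.2 else result ++ [p.2.headI]) acc
      = acc ++ items.map (fun p => p.2.headI) := by
  induction items generalizing acc with
  | nil => simp
  | cons p rest ih =>
    have hp : p.2 ≠ [] := h p (by simp)
    have hrest : ∀ q ∈ rest, q.2 ≠ [] := fun q hq => h q (by simp [hq])
    simp only [List.foldl_cons, List.map_cons]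
    rw [ih _ hrest]
    split_ifs with hl
    · obtain ⟨x, hx⟩ : ∃ x, p.2 = [x] := by
        cases h2 : p.2 with
        | nil => exact absurd h2 hp
        | cons a u =>
          cases u with
          | nil => exact ⟨a, rfl⟩
          | cons b w => simp [h2] at hl
      simp [hx]
    · simp

-- The grouping loop, tracked against B's single pass: keys = B's seen set, heads of groups = B's result.
theorem build_loop_eq (texts : List String) :
    ∀ (d : PySem.Dict Int (List String)),
    d.keys.Nodup → (∀ p ∈ d.items, p.2 ≠ []) →
    texts.foldl pvSStep (d.keys, pvHeads d)
      = ((texts.foldl pvDStep d).keys, pvHeads (texts.foldl pvDStep d))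
    ∧ (texts.foldl pvDStep d).keys.Nodup
    ∧ (∀ p ∈ (texts.foldl pvDStep d).items, p.2 ≠ []) := by
  induction texts with
  | nil => intro d hnd hne; exact ⟨rfl, hnd, hne⟩
  | cons t ts ih =>
    intro d hnd hne
    simp only [List.foldl_cons]
    have hcont : PySem.Set.contains d.keys (PySem.Str.len t) = d.contains (PySem.Str.len t) := by
      rw [PySem.Dict.contains_eq_decide_mem_keys]
      simp [PySem.Set.contains]
    by_cases hc : d.contains (PySem.Str.len t) = true
    · -- length already present: A appends to an existing group; head and keys unchanged, B's state unchanged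
      rw [pvDStep_of_contains d t hc]
      set d' := d.insert (PySem.Str.len t) (d.getD (PySem.Str.len t) [] ++ [t]) with hd'
      have hitems : d'.items
          = d.items.map (fun p => if p.1 == PySem.Str.len t
              then (PySem.Str.len t, d.getD (PySem.Str.len t) [] ++ [t]) else p) :=
        PySem.Dict.items_insert_of_contains d _ hc
      have hkeys : d'.keys = d.keys := PySem.Dict.keys_insert_of_contains d _ hc
      have hheads : pvHeads d' = pvHeads d := by
        unfold pvHeads
        rw [hitems, List.map_map]
        apply List.map_congr_left
        intro p hp
        by_cases h1 : p.1 = PySem.Str.len t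
        · have hpair : (PySem.Str.len t, p.2) ∈ d.items := by rw [← h1]; exact hp
          have hget : d.getD (PySem.Str.len t) [] = p.2 :=
            PySem.Dict.getD_of_mem_items d hpair hnd []
          simp only [Function.comp_apply, h1, beq_self_eq_true, if_true]
          rw [hget]
          exact headI_append_of_ne_nil _ _ (hne p hp)
        · simp only [Function.comp_apply, beq_iff_eq, if_neg h1]
      have hne' : ∀ p ∈ d'.items, p.2 ≠ [] := by
        intro p hp
        rw [hitems] at hp
        obtain ⟨q, hq, hpq⟩ := List.mem_map.mp hp
        by_cases h1 : q.1 = PySem.Str.len t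
        · simp only [h1, beq_self_eq_true, if_true] at hpq
          rw [← hpq]; simp
        · simp only [beq_iff_eq, if_neg h1] at hpq
          rw [← hpq]; exact hne q hq
      have hnd' : d'.keys.Nodup := by rw [hkeys]; exact hnd
      have hB : pvSStep (d.keys, pvHeads d) t = (d'.keys, pvHeads d') := by
        unfold pvSStep
        simp only [hcont, hc, if_true]
        rw [hkeys, hheads]
      rw [hB]
      exact ih d' hnd' hne'
    · -- new length: A opens a fresh singleton group; B records the length and appends the text
      have hc' : d.contains (PySem.Str.len t) = false := by simpa using hc
      have hnmem : PySem.Str.len t ∉ d.keys := by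
        intro hm
        have hmm := (PySem.Dict.contains_iff_mem_keys d _).mpr hm
        rw [hc'] at hmm
        exact absurd hmm (by simp)
      rw [pvDStep_of_not_contains d t hc']
      set d' := d.insert (PySem.Str.len t) [t] with hd'
      have hitems : d'.items = d.items ++ [(PySem.Str.len t, [t])] :=
        PySem.Dict.items_insert_of_not_contains d _ hc'
      have hkeys : d'.keys = d.keys ++ [PySem.Str.len t] :=
        PySem.Dict.keys_insert_of_not_contains d _ hc'
      have hheads : pvHeads d' = pvHeads d ++ [t] := by
        unfold pvHeads
        rw [hitems]
        simp
      have hne' : ∀ p ∈ d'.items, p.2 ≠ [] := by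
        intro p hp
        rw [hitems] at hp
        rcases List.mem_append.mp hp with h | h
        · exact hne p h
        · simp at h; rw [h]; simp
      have hnd' : d'.keys.Nodup := by
        rw [hkeys]
        refine List.Nodup.append hnd (List.nodup_singleton _) ?_
        intro a ha hb
        rw [List.mem_singleton] at hb
        rw [hb] at ha
        exact hnmem ha
      have hB : pvSStep (d.keys, pvHeads d) t = (d'.keys, pvHeads d') := by
        unfold pvSStep
        simp only [hcont, hc', Bool.false_eq_true, if_false]
        rw [PySem.Set.add_of_not_mem hnmem, hkeys, hheads]
      rw [hB]
      exact ih d' hnd' hne'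

-- ===== VERDICT (by name: the statement is the Claim_ definition above) =====
theorem length_based_dedup_spec : Claim_equal_length_based_dedup := by
  intro texts max_length_diff _
  unfold Spec_length_based_dedup
  have hA : length_based_dedup texts max_length_diff
      = (texts.foldl pvDStep PySem.Dict.empty).items.foldl (fun result p =>
          if p.2.length = 1 then result ++ p.2 else result ++ [p.2.headI]) [] := rfl
  have hB : length_based_dedup_alt texts max_length_diff
      = (texts.foldl pvSStep ((PySem.Dict.empty : PySem.Dict Int (List String)).keys,
          pvHeads PySem.Dict.empty)).2 := rfl
  obtain ⟨heq, _, hne⟩ := build_loop_eq texts PySem.Dict.empty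
    (by rw [PySem.Dict.keys_empty]; exact List.nodup_nil)
    (by intro p hp; simp [PySem.Dict.empty] at hp)
  rw [hA, hB, heq, finish_eq_map _ _ hne]
  simp [pvHeads]
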